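-- pv_equiv track=rewrite | github.com/UF4OVER/parking_lot_manager | date_anly.py | filter_result
-- ===== SOURCE A (Python) =====
-- def filter_result(result, exclude_last=True):  # 默认排除最后一个区间
--     """
--     过滤结果，排除最后一个区间
--     :param result: 包含各区间停车时长占比的字典
--     :param exclude_last: 是否排除最后一个区间，默认为 True
--     :return: 过滤后的字典
--     """
--     keys = list(result.keys())
--     if exclude_last and keys:
--         exclude_keys = [keys[-1]]
--     else:
--         exclude_keys = []
--
--     filtered_result = {key: value for key, value in result.items() if key not in exclude_keys}
--     return filtered_result
-- ===== SOURCE B (Python) =====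
-- def filter_result(result, exclude_last=True):
--     # Copy, then remove the last-inserted entry once; no per-key loop or membership test.
--     d = dict(result)
--     if exclude_last and d:
--         d.popitem()
--     return d
-- ===== Notes on version B (the rewrite author's own statement) =====
-- stated objective: simpler
-- what changed: Instead of listing the keys and rebuilding the dict with a per-key membership filter, B copies the dict once and removes the last-inserted entry with a single popitem().
import Mathlib
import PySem

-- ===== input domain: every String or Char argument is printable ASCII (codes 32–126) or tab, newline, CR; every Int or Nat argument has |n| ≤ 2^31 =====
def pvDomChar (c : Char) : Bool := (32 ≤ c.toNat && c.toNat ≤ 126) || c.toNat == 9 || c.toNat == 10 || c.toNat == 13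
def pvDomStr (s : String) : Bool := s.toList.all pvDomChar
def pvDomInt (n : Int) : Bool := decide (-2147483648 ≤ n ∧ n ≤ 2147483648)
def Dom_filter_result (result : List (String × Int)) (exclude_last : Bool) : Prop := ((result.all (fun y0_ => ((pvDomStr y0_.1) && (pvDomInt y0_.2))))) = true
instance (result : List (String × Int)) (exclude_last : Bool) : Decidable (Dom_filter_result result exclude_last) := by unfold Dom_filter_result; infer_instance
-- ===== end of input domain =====

-- B copies the dict once and removes the last-inserted entry with a single popitem(),
-- instead of rebuilding the dict with a per-key membership filter (objective: simpler).

-- ===== PORT A =====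
-- keys = list(result.keys()); if exclude_last and keys: exclude_keys=[keys[-1]] else [];
-- {k: v for k, v in result.items() if k not in exclude_keys}
-- (keys[-1] is only taken when keys is nonempty, so getLastD is exact there)
def filter_result (result : List (String × Int)) (exclude_last : Bool) : List (String × Int) :=
  let keys := result.map Prod.fst
  let exclude_keys := if exclude_last && !keys.isEmpty then [keys.getLastD ""] else []
  result.filter (fun p => !(exclude_keys.contains p.1))

-- ===== PORT B =====
-- d = dict(result); if exclude_last and d: d.popitem();  return d
def filter_result_alt (result : List (String × Int)) (exclude_last : Bool) : List (String × Int) :=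
  let d := result
  if exclude_last && !d.isEmpty then d.dropLast else d

-- ===== PRECONDITION & SPEC =====
-- Pre_ states only that `result` is a genuine dict: its keys are pairwise distinct
-- (every Python dict satisfies this; a Lean association list with duplicate keys
-- does not correspond to any Python input of A).
def Pre_filter_result (result : List (String × Int)) (exclude_last : Bool) : Prop :=
  (result.map Prod.fst).Nodup
instance (result : List (String × Int)) (exclude_last : Bool) : Decidable (Pre_filter_result result exclude_last) := by unfold Pre_filter_result; infer_instance
def pvWitness_filter_result : (List (String × Int)) × Bool := ([("a", 1), ("b", 2)], true)

def Spec_filter_result (result : List (String × Int)) (exclude_last : Bool) (out : List (String × Int)) : Prop := out = filter_result_alt result exclude_last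
instance (result : List (String × Int)) (exclude_last : Bool) (out : List (String × Int)) : Decidable (Spec_filter_result result exclude_last out) := by unfold Spec_filter_result; infer_instance

-- ===== CLAIM (what is proved, stated in full; the proofs are below) =====
def Claim_equal_filter_result : Prop := ∀ (result : List (String × Int)) (exclude_last : Bool), Dom_filter_result result exclude_last → Pre_filter_result result exclude_last → Spec_filter_result result exclude_last (filter_result result exclude_last)

-- ===== LEMMAS AND PROOFS =====

-- Filtering a nodup-keyed list by "key ≠ last key" removes exactly the last entry.
lemma filter_ne_last_key (l : List (String × Int)) (x : String × Int)
    (h : ∀ p ∈ l, p.1 ≠ x.1) :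
    (l ++ [x]).filter (fun p => !([x.1].contains p.1)) = l := by
  rw [List.filter_append]
  have h1 : l.filter (fun p => !([x.1].contains p.1)) = l := by
    apply List.filter_eq_self.mpr
    intro p hp
    simp [h p hp]
  have h2 : [x].filter (fun p => !([x.1].contains p.1)) = [] := by
    simp [List.filter]
  rw [h1, h2, List.append_nil]

-- ===== VERDICT (by name: the statement is the Claim_ definition above) =====
theorem filter_result_spec : Claim_equal_filter_result := by
  intro result exclude_last _ pre
  unfold Spec_filter_result filter_result filter_result_alt
  cases exclude_last with
  | false => simp
  | true =>
    cases hr : result.isEmpty with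
    | true =>
      rw [List.isEmpty_iff] at hr
      subst hr; simp
    | false =>
      rw [List.isEmpty_eq_false_iff_exists_mem] at hr
      have hne : result ≠ [] := by rintro rfl; simp at hr
      obtain ⟨l, x, hx⟩ := (List.eq_nil_or_concat result).resolve_left hne
      rw [List.concat_eq_append] at hx
      subst hx
      unfold Pre_filter_result at pre
      have hforall : ∀ p ∈ l, p.1 ≠ x.1 := by
        intro p hp
        rw [List.map_append, List.nodup_append] at pre
        exact pre.2.2 p.1 (List.mem_map_of_mem hp) x.1 (by simp)
      have hcond1 : (true && !((l ++ [x]).map Prod.fst).isEmpty) = true := by simp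
      have hcond2 : (true && !(l ++ [x]).isEmpty) = true := by simp
      simp only [if_pos hcond1, if_pos hcond2]
      have hkeys : ((l ++ [x]).map Prod.fst).getLastD "" = x.1 := by
        simp [List.map_append]
      have hdrop : (l ++ [x]).dropLast = l := by simp
      rw [hkeys, hdrop]
      exact filter_ne_last_key l x hforall
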